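-- pv_equiv track=rewrite | github.com/j4ke-exe/Georgia-Tech-Prep | BootDev/Python/exp_growth.py | exponential_growth
-- ===== SOURCE A (Python) =====
-- def exponential_growth(n, factor, days):
--     result = [] # Sets empty list
--     current = n # Initializes current to n
--
--     for day in range(0, days + 1): # Loops from 0 to x days
--         result.append(current) # Append the current value to result
--         growth = (current * factor) # Formula to calculate exponential growth
--         current = growth # Assign the calculated growth: (For x days, growth factor * previous days value = current)
--     return result
-- ===== SOURCE B (Python) =====
-- def exponential_growth(n, factor, days):
--     return [n * factor ** day for day in range(days + 1)]
-- ===== Notes on version B (the rewrite author's own statement) =====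
-- stated objective: simpler
-- what changed: Replaces the explicit append/running-product loop with a closed-form comprehension n * factor**day over range(days+1); exact because the arguments are integers.
import Mathlib
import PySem

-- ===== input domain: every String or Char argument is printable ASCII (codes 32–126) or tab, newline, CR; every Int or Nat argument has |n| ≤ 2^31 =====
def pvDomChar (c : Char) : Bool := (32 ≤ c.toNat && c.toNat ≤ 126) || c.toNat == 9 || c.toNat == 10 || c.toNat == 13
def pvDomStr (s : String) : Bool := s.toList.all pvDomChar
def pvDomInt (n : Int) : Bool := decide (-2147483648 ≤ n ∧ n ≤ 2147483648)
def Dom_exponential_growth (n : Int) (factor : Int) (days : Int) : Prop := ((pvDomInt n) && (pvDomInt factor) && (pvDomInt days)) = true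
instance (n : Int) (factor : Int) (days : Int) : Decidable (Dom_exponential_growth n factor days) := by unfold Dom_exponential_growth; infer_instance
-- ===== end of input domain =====

-- B replaces A's append/running-product loop with a closed-form comprehension n * factor^day (simpler; not faster on big integers).

-- ===== PORT A =====
-- A: explicit loop keeping (result, current), appending current then multiplying by factor each day.
def exponential_growth (n : Int) (factor : Int) (days : Int) : List Int :=
  (((PySem.List.pyRange 0 (days + 1) 1).foldl
      (fun (st : List Int × Int) _day => (st.1 ++ [st.2], st.2 * factor))
      ([], n))).1

-- ===== PORT B =====
-- B: closed form — value at each day is n * factor ^ day.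
def exponential_growth_alt (n : Int) (factor : Int) (days : Int) : List Int :=
  (PySem.List.pyRange 0 (days + 1) 1).map (fun day => n * factor ^ day.toNat)

-- ===== PRECONDITION & SPEC =====
def Spec_exponential_growth (n : Int) (factor : Int) (days : Int) (out : List Int) : Prop := out = exponential_growth_alt n factor days
instance (n : Int) (factor : Int) (days : Int) (out : List Int) : Decidable (Spec_exponential_growth n factor days out) := by unfold Spec_exponential_growth; infer_instance

-- ===== CLAIM (what is proved, stated in full; the proofs are below) =====
def Claim_equal_exponential_growth : Prop := ∀ (n : Int) (factor : Int) (days : Int), Dom_exponential_growth n factor days → Spec_exponential_growth n factor days (exponential_growth n factor days)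

-- ===== LEMMAS AND PROOFS =====

lemma growth_loop (factor : Int) (l : List Int) :
    ∀ (acc : List Int) (c : Int),
      (l.foldl (fun (st : List Int × Int) _ => (st.1 ++ [st.2], st.2 * factor)) (acc, c)).1
        = acc ++ (List.range l.length).map (fun i => c * factor ^ i) := by
  induction l with
  | nil => simp
  | cons x xs ih =>
      intro acc c
      simp only [List.foldl_cons, List.length_cons, ih, List.range_succ_eq_map,
        List.map_cons, List.map_map]
      have h : (fun i => c * factor ^ i) ∘ Nat.succ = fun i => c * factor * factor ^ i := by
        funext i
        simp [Function.comp, pow_succ]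
        ring
      simp [h]

-- ===== VERDICT (by name: the statement is the Claim_ definition above) =====
theorem exponential_growth_spec : Claim_equal_exponential_growth := by
  intro n factor days _
  unfold Spec_exponential_growth exponential_growth exponential_growth_alt
  rw [PySem.List.pyRange_one, growth_loop]
  simp
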